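-- pv_equiv track=rewrite | github.com/Suryakiran-Santhosh/Algorithms_Practice | validPalindromeDB.py | validPalindrome
-- ===== SOURCE A (Python) =====
-- def validPalindrome(s: str) -> bool:
--     """
--     two pointer: one front and one back of string, move towards the middle until all the letters in string have been processed
--     """
--     cleanS = ""
--
--     # clean the string of all non alphabetical letters
--     for i in range(0, len(s), 1):
--         if s[i].isalpha():
--             cleanS += str(s[i].lower())
--
--     left = 0
--     right = len(cleanS) - 1
--
--     while left <= right:
--         if (cleanS[left].isalpha() and cleanS[right].isalpha()):
--             if (cleanS[left] != cleanS[right]):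
--                 return False
--         left += 1
--         right -= 1
--     return True
-- ===== SOURCE B (Python) =====
-- def validPalindrome(s: str) -> bool:
--     # in-place two pointers over the ORIGINAL string: skip non-alphabetic
--     # characters as we go; no cleaned copy of the string is ever built
--     i, j = 0, len(s) - 1
--     while i < j:
--         if not s[i].isalpha():
--             i += 1
--         elif not s[j].isalpha():
--             j -= 1
--         elif s[i].lower() != s[j].lower():
--             return False
--         else:
--             i += 1
--             j -= 1
--     return True
-- ===== Notes on version B (the rewrite author's own statement) =====
-- stated objective: alternative
-- what changed: A first materializes a cleaned lowercase-alphabetic copy of the string and then runs a converging two-pointer loop over that copy; B never builds any copy: it runs skip-pointers directly on the original string, advancing past non-alphabetic characters in place (O(1) extra space, no intermediate string construction).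
import Mathlib
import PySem

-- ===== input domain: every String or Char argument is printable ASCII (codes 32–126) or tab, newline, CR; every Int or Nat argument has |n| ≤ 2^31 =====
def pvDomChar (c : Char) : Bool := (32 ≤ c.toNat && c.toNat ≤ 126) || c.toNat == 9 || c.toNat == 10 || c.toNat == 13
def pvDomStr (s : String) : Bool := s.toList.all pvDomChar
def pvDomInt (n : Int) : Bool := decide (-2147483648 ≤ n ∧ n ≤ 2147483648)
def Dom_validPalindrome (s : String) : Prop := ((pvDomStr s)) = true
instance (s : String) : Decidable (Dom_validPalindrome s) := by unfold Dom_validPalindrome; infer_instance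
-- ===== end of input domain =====

-- B replaces A's two-phase algorithm (build a cleaned lowercase copy, then run a converging
-- two-pointer loop over that copy) by in-place skip pointers on the ORIGINAL string that step
-- past non-alphabetic characters as they go; no cleaned copy is ever built (O(1) extra space).

-- ===== PORT A =====
-- the while-loop: left/right converge over the cleaned copy; pyGet? is Python indexing
-- (none = IndexError, unreachable here)
def validPalindromeLoop (cs : List Char) (left right : Int) : Bool :=
  if left ≤ right then
    match PySem.List.pyGet? cs left, PySem.List.pyGet? cs right with
    | some cl, some cr =>
      if PySem.Chars.isalpha cl && PySem.Chars.isalpha cr then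
        if cl ≠ cr then false
        else validPalindromeLoop cs (left + 1) (right - 1)
      else validPalindromeLoop cs (left + 1) (right - 1)
    | _, _ => false
  else true
termination_by (right + 1 - left).toNat
decreasing_by all_goals omega

-- 'for i in range(0, len(s), 1): if s[i].isalpha(): cleanS += s[i].lower()' — the same
-- characters visited in the same order, as a fold over the string's characters
def validPalindrome (s : String) : Bool :=
  let cleanS := s.toList.foldl
    (fun acc c => if PySem.Chars.isalpha c then acc ++ [PySem.Chars.lowerChar c] else acc) []
  validPalindromeLoop cleanS 0 ((cleanS.length : Int) - 1)

-- ===== PORT B =====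
-- 'while i < j: skip non-alpha on either side, else compare lowered chars' on the raw string
def skipLoop (cs : List Char) (i j : Int) : Bool :=
  if i < j then
    match PySem.List.pyGet? cs i, PySem.List.pyGet? cs j with
    | some ci, some cj =>
      if ¬ PySem.Chars.isalpha ci then skipLoop cs (i + 1) j
      else if ¬ PySem.Chars.isalpha cj then skipLoop cs i (j - 1)
      else if PySem.Chars.lowerChar ci ≠ PySem.Chars.lowerChar cj then false
      else skipLoop cs (i + 1) (j - 1)
    | _, _ => false
  else true
termination_by (j - i).toNat
decreasing_by all_goals omega

def validPalindrome_alt (s : String) : Bool :=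
  skipLoop s.toList 0 ((s.toList.length : Int) - 1)

-- ===== PRECONDITION & SPEC =====
def Spec_validPalindrome (s : String) (out : Bool) : Prop := out = validPalindrome_alt s
instance (s : String) (out : Bool) : Decidable (Spec_validPalindrome s out) := by unfold Spec_validPalindrome; infer_instance

-- ===== CLAIM (what is proved, stated in full; the proofs are below) =====
def Claim_equal_validPalindrome : Prop := ∀ (s : String), Dom_validPalindrome s → Spec_validPalindrome s (validPalindrome s)

-- ===== LEMMAS AND PROOFS =====

theorem pyGet?_int (cs : List Char) (l : Int) (h0 : 0 ≤ l) (h1 : l < (cs.length : Int)) :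
    PySem.List.pyGet? cs l = some (cs[l.toNat]'(by omega)) := by
  have := PySem.List.pyGet?_ofNat cs l.toNat (by omega)
  rwa [Int.toNat_of_nonneg h0] at this

-- the two-pointer loop decides exactly the pairwise mirror condition on the segment [l, r]
theorem validPalindromeLoop_iff (cs : List Char)
    (hal : ∀ c ∈ cs, PySem.Chars.isalpha c = true) :
    ∀ (l r : Int), 0 ≤ l → r < (cs.length : Int) →
      (validPalindromeLoop cs l r = true ↔
        (∀ i : Nat, l ≤ (i : Int) → (i : Int) ≤ r → cs[i]? = cs[(l + r - i).toNat]?)) := by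
  intro l r
  induction l, r using validPalindromeLoop.induct cs with
  | case1 l r hle cl cr hgr hgl hguard hne =>
      intro hl hr
      rw [validPalindromeLoop]
      simp only [hle, if_pos, hgl, hgr, hguard]
      rw [if_pos hne]
      constructor
      · intro h; cases h
      · intro h
        exfalso
        have h1 := pyGet?_int cs l hl (by omega)
        have h2 := pyGet?_int cs r (by omega) hr
        rw [h1] at hgl; rw [h2] at hgr
        have hcl : cl = cs[l.toNat]'(by omega) := by injection hgl.symm
        have hcr : cr = cs[r.toNat]'(by omega) := by injection hgr.symm
        have := h l.toNat (by omega) (by omega)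
        have harg : (l + r - (l.toNat : Int)).toNat = r.toNat := by omega
        rw [harg] at this
        rw [List.getElem?_eq_getElem (by omega), List.getElem?_eq_getElem (by omega)] at this
        apply hne
        rw [hcl, hcr]
        injection this
  | case2 l r hle cl cr hgr hgl hguard heq ih =>
      intro hl hr
      rw [validPalindromeLoop]
      simp only [hle, if_pos, hgl, hgr, hguard]
      rw [if_neg heq]
      rw [ih (by omega) (by omega)]
      have h1 := pyGet?_int cs l hl (by omega)
      have h2 := pyGet?_int cs r (by omega) hr
      rw [h1] at hgl; rw [h2] at hgr
      have hcl : cl = cs[l.toNat]'(by omega) := by injection hgl.symm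
      have hcr : cr = cs[r.toNat]'(by omega) := by injection hgr.symm
      have heq' : cs[l.toNat]'(by omega) = cs[r.toNat]'(by omega) := by
        rw [← hcl, ← hcr]; by_contra hc; exact heq hc
      constructor
      · intro h i hil hir
        by_cases he1 : (i : Int) = l
        · have harg : (l + r - (i : Int)).toNat = r.toNat := by omega
          have hi : i = l.toNat := by omega
          rw [harg, hi]
          rw [List.getElem?_eq_getElem (by omega), List.getElem?_eq_getElem (by omega)]
          exact congrArg some heq'
        · by_cases he2 : (i : Int) = r
          · have harg : (l + r - (i : Int)).toNat = l.toNat := by omega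
            have hi : i = r.toNat := by omega
            rw [harg, hi]
            rw [List.getElem?_eq_getElem (by omega), List.getElem?_eq_getElem (by omega)]
            exact congrArg some heq'.symm
          · have := h i (by omega) (by omega)
            rwa [show l + 1 + (r - 1) - (i : Int) = l + r - i by ring] at this
      · intro h i hil hir
        have := h i (by omega) (by omega)
        rwa [show l + r - (i : Int) = l + 1 + (r - 1) - i by ring] at this
  | case3 l r hle cl cr hgr hgl hguard ih =>
      intro hl hr
      exfalso
      have h1 := pyGet?_int cs l hl (by omega)
      have h2 := pyGet?_int cs r (by omega) hr
      rw [h1] at hgl; rw [h2] at hgr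
      have hcl : cl = cs[l.toNat]'(by omega) := by injection hgl.symm
      have hcr : cr = cs[r.toNat]'(by omega) := by injection hgr.symm
      apply hguard
      rw [hcl, hcr, hal _ (List.getElem_mem _), hal _ (List.getElem_mem _)]
      rfl
  | case4 l r hle hmatch =>
      intro hl hr
      exfalso
      have h1 := pyGet?_int cs l hl (by omega)
      have h2 := pyGet?_int cs r (by omega) hr
      exact hmatch _ _ h1 h2
  | case5 l r hle =>
      intro hl hr
      rw [validPalindromeLoop]
      rw [if_neg hle]
      simp only [true_iff]
      intro i hil hir
      omega

theorem isalpha_lowerChar_of (c : Char) (h : PySem.Chars.isalpha c = true) :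
    PySem.Chars.isalpha (PySem.Chars.lowerChar c) = true := by
  simp only [PySem.Chars.isalpha, PySem.Chars.lowerChar, PySem.Chars.isupper, PySem.Chars.islower,
    Bool.or_eq_true, Bool.and_eq_true, decide_eq_true_eq] at *
  split_ifs with hu
  · right
    obtain ⟨h1, h2⟩ : 'A' ≤ c ∧ c ≤ 'Z' := hu
    rw [Char.le_def, UInt32.le_iff_toNat_le] at h1 h2
    have e1 : 'A'.val.toNat = 65 := rfl
    have e2 : 'Z'.val.toNat = 90 := rfl
    have e3 : c.toNat = c.val.toNat := rfl
    have hv : (c.toNat + 32).isValidChar := Or.inl (by omega)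
    have ht : (Char.ofNat (c.toNat + 32)).toNat = c.toNat + 32 := by
      rw [Char.toNat_ofNat, if_pos hv]
    have e4 : (Char.ofNat (c.toNat+32)).val.toNat = (Char.ofNat (c.toNat+32)).toNat := rfl
    constructor <;> rw [Char.le_def, UInt32.le_iff_toNat_le] <;> rw [e4, ht] <;>
      first
      | (show 'a'.val.toNat ≤ _ ; have : 'a'.val.toNat = 97 := rfl; omega)
      | (show _ ≤ 'z'.val.toNat ; have : 'z'.val.toNat = 122 := rfl; omega)
  · exact h

-- the mirror condition over the whole list is equality with the reverse
theorem mirror_iff_reverse (cs : List Char) :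
    (∀ i : Nat, (0 : Int) ≤ (i : Int) → (i : Int) ≤ (cs.length : Int) - 1 →
        cs[i]? = cs[((0 : Int) + ((cs.length : Int) - 1) - i).toNat]?) ↔ cs = cs.reverse := by
  constructor
  · intro h
    refine List.ext_getElem? fun i => ?_
    by_cases hi : i < cs.length
    · rw [List.getElem?_reverse hi]
      have := h i (by omega) (by omega)
      rwa [show ((0 : Int) + ((cs.length : Int) - 1) - i).toNat = cs.length - 1 - i by omega] at this
    · rw [List.getElem?_eq_none (by omega), List.getElem?_eq_none (by simp; omega)]
  · intro h i h0 h1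
    have hi : i < cs.length := by omega
    rw [show ((0 : Int) + ((cs.length : Int) - 1) - i).toNat = cs.length - 1 - i by omega,
      ← List.getElem?_reverse hi, ← h]

-- ---- B-side: skipLoop decides palindromicity of the cleaned segment cs[i..j] ----

-- cleaned content of the segment cs[i..j] (inclusive), proof-only helper
def cleanSeg (cs : List Char) (i j : Int) : List Char :=
  ((((cs.take (j + 1).toNat).drop i.toNat)).filter PySem.Chars.isalpha).map PySem.Chars.lowerChar

theorem reverse_short (l : List Char) (h : l.length ≤ 1) : l.reverse = l := by
  match l with
  | [] => rfl
  | [a] => rfl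
  | a :: b :: t => simp at h

theorem cons_append_singleton_pal (a b : Char) (l : List Char) :
    (a :: (l ++ [b]) = (a :: (l ++ [b])).reverse) ↔ (a = b ∧ l = l.reverse) := by
  have hrev : (a :: (l ++ [b])).reverse = b :: (l.reverse ++ [a]) := by
    simp
  rw [hrev, List.cons_eq_cons]
  constructor
  · rintro ⟨rfl, h2⟩
    exact ⟨rfl, List.append_cancel_right h2⟩
  · rintro ⟨rfl, h2⟩
    exact ⟨rfl, by rw [← h2]⟩

theorem skipLoop_iff (cs : List Char) :
    ∀ (i j : Int), 0 ≤ i → j < (cs.length : Int) →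
      (skipLoop cs i j = true ↔ cleanSeg cs i j = (cleanSeg cs i j).reverse) := by
  intro i j
  induction i, j using skipLoop.induct cs with
  | case1 i j hlt ci cj hgj hgi hna ih =>
      intro hi hj
      rw [skipLoop]
      rw [if_pos hlt, hgi, hgj]
      simp only [hna, if_pos]
      have hgi' := pyGet?_int cs i hi (by omega)
      rw [hgi'] at hgi
      have hci : ci = cs[i.toNat]'(by omega) := by injection hgi.symm
      have hseg : cleanSeg cs i j = cleanSeg cs (i + 1) j := by
        unfold cleanSeg
        have hlen : (cs.take (j + 1).toNat).length = (j + 1).toNat := by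
          rw [List.length_take]; omega
        have hidx : i.toNat < (cs.take (j + 1).toNat).length := by omega
        rw [List.drop_eq_getElem_cons hidx]
        have hget : (cs.take (j + 1).toNat)[i.toNat]'hidx = cs[i.toNat]'(by omega) :=
          List.getElem_take
        rw [hget, List.filter_cons]
        have hfa : PySem.Chars.isalpha (cs[i.toNat]'(by omega)) = false := by
          rw [← hci]; exact Bool.not_eq_true _ ▸ (by simpa using hna)
        rw [hfa]
        simp only [Bool.false_eq_true, if_neg, ite_false]
        have : (i + 1).toNat = i.toNat + 1 := by omega
        rw [this]
      rw [hseg]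
      exact ih (by omega) hj
  | case2 i j hlt ci cj hgj hgi ha hnb ih =>
      intro hi hj
      rw [skipLoop]
      rw [if_pos hlt, hgi, hgj]
      simp only [ha, hnb, if_pos, if_neg]
      have hgj' := pyGet?_int cs j (by omega) hj
      rw [hgj'] at hgj
      have hcj : cj = cs[j.toNat]'(by omega) := by injection hgj.symm
      have hseg : cleanSeg cs i j = cleanSeg cs i (j - 1) := by
        unfold cleanSeg
        have h1 : (j + 1).toNat = j.toNat + 1 := by omega
        rw [h1, List.take_succ]
        have h2 : cs[j.toNat]? = some (cs[j.toNat]'(by omega)) :=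
          List.getElem?_eq_getElem (by omega)
        rw [h2]
        have h3 : i.toNat ≤ (cs.take j.toNat).length := by
          rw [List.length_take]; omega
        rw [List.drop_append_of_le_length h3, List.filter_append]
        have hfb : PySem.Chars.isalpha (cs[j.toNat]'(by omega)) = false := by
          rw [← hcj]; exact Bool.not_eq_true _ ▸ (by simpa using hnb)
        simp only [Option.toList_some, List.filter_cons, hfb]
        have h4 : (j - 1 + 1).toNat = j.toNat := by omega
        rw [h4]
        simp
      rw [hseg]
      exact ih hi (by omega)
  | case3 i j hlt ci cj hgj hgi ha hb hne =>
      intro hi hj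
      rw [skipLoop]
      rw [if_pos hlt, hgi, hgj]
      simp only [ha, hb, if_neg, if_pos]
      rw [if_pos hne]
      have hgi' := pyGet?_int cs i hi (by omega)
      have hgj' := pyGet?_int cs j (by omega) hj
      rw [hgi'] at hgi; rw [hgj'] at hgj
      have hci : ci = cs[i.toNat]'(by omega) := by injection hgi.symm
      have hcj : cj = cs[j.toNat]'(by omega) := by injection hgj.symm
      constructor
      · intro h; cases h
      · intro h
        exfalso
        -- decompose the segment: first char and last char are ci, cj (both alpha)
        have hseg : cleanSeg cs i j =
            PySem.Chars.lowerChar ci :: (cleanSeg cs (i + 1) (j - 1) ++ [PySem.Chars.lowerChar cj]) := by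
          unfold cleanSeg
          have h1 : (j + 1).toNat = j.toNat + 1 := by omega
          rw [h1, List.take_succ]
          have h2 : cs[j.toNat]? = some (cs[j.toNat]'(by omega)) :=
            List.getElem?_eq_getElem (by omega)
          rw [h2]
          have h3 : i.toNat ≤ (cs.take j.toNat).length := by
            rw [List.length_take]; omega
          rw [List.drop_append_of_le_length h3]
          have hlen : (cs.take j.toNat).length = j.toNat := by
            rw [List.length_take]; omega
          have hidx : i.toNat < (cs.take j.toNat).length := by omega
          rw [List.drop_eq_getElem_cons hidx]
          have hget : (cs.take j.toNat)[i.toNat]'hidx = cs[i.toNat]'(by omega) :=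
            List.getElem_take
          rw [hget]
          have hfa : PySem.Chars.isalpha (cs[i.toNat]'(by omega)) = true := by
            rw [← hci]; simpa using ha
          have hfb : PySem.Chars.isalpha (cs[j.toNat]'(by omega)) = true := by
            rw [← hcj]; simpa using hb
          have h4 : (j - 1 + 1).toNat = j.toNat := by omega
          have h5 : (i + 1).toNat = i.toNat + 1 := by omega
          simp only [Option.toList_some, List.cons_append, List.filter_cons, List.filter_append,
            hfa, hfb, ite_true, List.map_cons, List.map_append, h4, h5, List.filter_nil,
            List.map_nil, List.append_nil, hci, hcj]
        rw [hseg, cons_append_singleton_pal] at h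
        exact hne h.1
  | case4 i j hlt ci cj hgj hgi ha hb hnn ih =>
      intro hi hj
      rw [skipLoop]
      rw [if_pos hlt, hgi, hgj]
      simp only [ha, hb, if_false]
      rw [if_neg hnn]
      have heq : PySem.Chars.lowerChar ci = PySem.Chars.lowerChar cj := not_ne_iff.mp hnn
      have hgi' := pyGet?_int cs i hi (by omega)
      have hgj' := pyGet?_int cs j (by omega) hj
      rw [hgi'] at hgi; rw [hgj'] at hgj
      have hci : ci = cs[i.toNat]'(by omega) := by injection hgi.symm
      have hcj : cj = cs[j.toNat]'(by omega) := by injection hgj.symm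
      have hseg : cleanSeg cs i j =
          PySem.Chars.lowerChar ci :: (cleanSeg cs (i + 1) (j - 1) ++ [PySem.Chars.lowerChar cj]) := by
        unfold cleanSeg
        have h1 : (j + 1).toNat = j.toNat + 1 := by omega
        rw [h1, List.take_succ]
        have h2 : cs[j.toNat]? = some (cs[j.toNat]'(by omega)) :=
          List.getElem?_eq_getElem (by omega)
        rw [h2]
        have h3 : i.toNat ≤ (cs.take j.toNat).length := by
          rw [List.length_take]; omega
        rw [List.drop_append_of_le_length h3]
        have hlen : (cs.take j.toNat).length = j.toNat := by
          rw [List.length_take]; omega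
        have hidx : i.toNat < (cs.take j.toNat).length := by omega
        rw [List.drop_eq_getElem_cons hidx]
        have hget : (cs.take j.toNat)[i.toNat]'hidx = cs[i.toNat]'(by omega) :=
          List.getElem_take
        rw [hget]
        have hfa : PySem.Chars.isalpha (cs[i.toNat]'(by omega)) = true := by
          rw [← hci]; simpa using ha
        have hfb : PySem.Chars.isalpha (cs[j.toNat]'(by omega)) = true := by
          rw [← hcj]; simpa using hb
        have h4 : (j - 1 + 1).toNat = j.toNat := by omega
        have h5 : (i + 1).toNat = i.toNat + 1 := by omega
        simp only [Option.toList_some, List.cons_append, List.filter_cons, List.filter_append,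
          hfa, hfb, ite_true, List.map_cons, List.map_append, h4, h5, List.filter_nil,
          List.map_nil, List.append_nil, hci, hcj]
      rw [hseg, cons_append_singleton_pal, ih (by omega) (by omega)]
      simp [heq]
  | case5 i j hlt hmatch =>
      intro hi hj
      exfalso
      have h1 := pyGet?_int cs i hi (by omega)
      have h2 := pyGet?_int cs j (by omega) hj
      exact hmatch _ _ h1 h2
  | case6 i j hnlt =>
      intro hi hj
      rw [skipLoop, if_neg hnlt]
      have hlen : (cleanSeg cs i j).length ≤ 1 := by
        unfold cleanSeg
        rw [List.length_map]
        calc (((cs.take (j + 1).toNat).drop i.toNat).filter PySem.Chars.isalpha).length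
            ≤ ((cs.take (j + 1).toNat).drop i.toNat).length := List.length_filter_le _ _
          _ = (cs.take (j + 1).toNat).length - i.toNat := List.length_drop
          _ ≤ 1 := by rw [List.length_take]; omega
      exact ⟨fun _ => (reverse_short _ hlen).symm, fun _ => rfl⟩

-- ===== VERDICT (by name: the statement is the Claim_ definition above) =====
theorem validPalindrome_spec : Claim_equal_validPalindrome := by
  intro s _
  unfold Spec_validPalindrome validPalindrome validPalindrome_alt
  rw [PySem.List.foldl_append_if]
  simp only [List.nil_append]
  set cl := (s.toList.filter PySem.Chars.isalpha).map PySem.Chars.lowerChar with hcl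
  have hal : ∀ c ∈ cl, PySem.Chars.isalpha c = true := by
    intro c hc
    rw [hcl] at hc
    obtain ⟨d, hd, rfl⟩ := List.mem_map.mp hc
    exact isalpha_lowerChar_of d (List.of_mem_filter hd)
  have hseg : cleanSeg s.toList 0 ((s.toList.length : Int) - 1) = cl := by
    unfold cleanSeg
    have h1 : (((s.toList.length : Int) - 1) + 1).toNat = s.toList.length := by omega
    rw [h1, List.take_length]
    rfl
  have hA : (validPalindromeLoop cl 0 ((cl.length : Int) - 1) = true) ↔ cl = cl.reverse := by
    rw [validPalindromeLoop_iff cl hal 0 ((cl.length : Int) - 1) le_rfl (by omega)]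
    exact mirror_iff_reverse cl
  have hB : (skipLoop s.toList 0 ((s.toList.length : Int) - 1) = true) ↔ cl = cl.reverse := by
    rw [skipLoop_iff s.toList 0 ((s.toList.length : Int) - 1) le_rfl (by omega), hseg]
  rw [Bool.eq_iff_iff, hA, hB]
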